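-- pv_equiv track=rewrite | github.com/shahsalonik/AI-2022-23 | Unit 5/2 Shah Saloni dict_search.py | max_adj_chars
-- ===== SOURCE A (Python) =====
-- def max_adj_chars(word):
--     adj_count = dict()
--     max_count = 0
--
--     for char in range(0, len(word) - 1):
--         join = word[char] + word[char + 1]
--         if join in adj_count:
--             adj_count[join] += 1
--         else:
--             adj_count[join] = 1
--
--     for key in adj_count.keys():
--         if adj_count[key] > max_count:
--             max_count = adj_count[key]
--
--     return max_count
-- ===== SOURCE B (Python) =====
-- def max_adj_chars(word):
--     bigrams = sorted(word[i] + word[i + 1] for i in range(len(word) - 1))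
--     best = 0
--     run = 0
--     prev = None
--     for bg in bigrams:
--         run = run + 1 if bg == prev else 1
--         prev = bg
--         if run > best:
--             best = run
--     return best
-- ===== Notes on version B (the rewrite author's own statement) =====
-- stated objective: alternative
-- what changed: Replaces A's bigram frequency dictionary plus max-over-keys pass by sorting the bigram list and taking the longest run of equal adjacent elements in one linear scan.
import Mathlib
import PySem

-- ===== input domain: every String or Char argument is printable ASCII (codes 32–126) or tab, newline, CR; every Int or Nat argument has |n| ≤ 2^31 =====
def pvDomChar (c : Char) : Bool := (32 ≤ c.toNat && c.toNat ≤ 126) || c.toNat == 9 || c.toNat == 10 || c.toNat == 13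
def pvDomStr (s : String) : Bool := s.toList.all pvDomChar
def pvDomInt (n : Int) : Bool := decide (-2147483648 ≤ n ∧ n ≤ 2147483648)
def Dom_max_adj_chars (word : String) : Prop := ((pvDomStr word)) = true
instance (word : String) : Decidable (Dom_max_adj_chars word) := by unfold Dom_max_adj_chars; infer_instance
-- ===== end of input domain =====

-- B replaces A's frequency dict + max-over-keys by sorting the bigram list and taking the longest
-- run of equal adjacent elements in one linear scan (objective: alternative algorithm, same result).

-- ===== PORT A =====
def max_adj_chars (word : String) : Int :=
  let cs := word.toList
  let adj_count : PySem.Dict (List Char) Int :=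
    (PySem.List.pyRange 0 (PySem.List.len cs - 1)).foldl
      (fun d i =>
        let join := [PySem.List.pyGetD cs i ' ', PySem.List.pyGetD cs (i + 1) ' ']
        if d.contains join then d.insert join (d.getD join 0 + 1) else d.insert join 1)
      PySem.Dict.empty
  adj_count.keys.foldl
    (fun max_count key =>
      if adj_count.getD key 0 > max_count then adj_count.getD key 0 else max_count) 0

-- ===== PORT B =====
-- the sorted list of adjacent bigrams (B's 'sorted(word[i] + word[i+1] for i in range(len(word)-1))')
def pvBigrams (cs : List Char) : List (List Char) :=
  (PySem.List.pyRange 0 (PySem.List.len cs - 1)).map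
    (fun i => [PySem.List.pyGetD cs i ' ', PySem.List.pyGetD cs (i + 1) ' '])

-- one step of B's run-length loop over state (prev, run, best)
def pvStepB (st : Option (List Char) × Int × Int) (bg : List Char) :
    Option (List Char) × Int × Int :=
  let run := if some bg == st.1 then st.2.1 + 1 else 1
  let best := if run > st.2.2 then run else st.2.2
  (some bg, run, best)

def max_adj_chars_alt (word : String) : Int :=
  let bigrams := PySem.List.sorted (pvBigrams word.toList) id
  (bigrams.foldl pvStepB (none, 0, 0)).2.2

-- ===== PRECONDITION & SPEC =====
def Spec_max_adj_chars (word : String) (out : Int) : Prop := out = max_adj_chars_alt word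
instance (word : String) (out : Int) : Decidable (Spec_max_adj_chars word out) := by unfold Spec_max_adj_chars; infer_instance

-- ===== CLAIM (what is proved, stated in full; the proofs are below) =====
def Claim_equal_max_adj_chars : Prop := ∀ (word : String), Dom_max_adj_chars word → Spec_max_adj_chars word (max_adj_chars word)

-- ===== LEMMAS AND PROOFS =====

-- maximal multiplicity of an element of l (the count at each first occurrence, maximised)
def maxMult : List (List Char) → Nat
  | [] => 0
  | x :: xs => max (1 + xs.count x) (maxMult xs)

lemma count_le_maxMult (l : List (List Char)) (k : List Char) : l.count k ≤ maxMult l := by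
  induction l with
  | nil => simp [maxMult]
  | cons x xs ih =>
    by_cases h : k = x
    · subst h; simp [maxMult]
    · simp [maxMult, show x ≠ k from fun e => h e.symm]; omega

lemma maxMult_le_nat (l : List (List Char)) (A : Nat)
    (h : ∀ k ∈ l, l.count k ≤ A) : maxMult l ≤ A := by
  induction l with
  | nil => simp [maxMult]
  | cons x xs ih =>
    have h1 : 1 + xs.count x ≤ A := by
      have := h x (List.mem_cons_self ..)
      simp at this; omega
    have h2 : maxMult xs ≤ A := by
      apply ih; intro k hk
      have := h k (List.mem_cons_of_mem _ hk)
      simp [List.count_cons] at this ⊢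
      split at this <;> omega
    simp [maxMult]; omega

lemma maxMult_le_int (l : List (List Char)) (A : Int) (h0 : 0 ≤ A)
    (h : ∀ k ∈ l, (l.count k : Int) ≤ A) : (maxMult l : Int) ≤ A := by
  induction l with
  | nil => simpa [maxMult] using h0
  | cons x xs ih =>
    have h1 : ((x :: xs).count x : Int) ≤ A := h x (List.mem_cons_self ..)
    have h2 : (maxMult xs : Int) ≤ A := by
      apply ih; intro k hk
      have := h k (List.mem_cons_of_mem _ hk)
      simp [List.count_cons] at this ⊢
      split at this <;> omega
    simp [maxMult] at h1 ⊢
    omega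

lemma maxMult_perm (l l' : List (List Char)) (h : l.Perm l') : maxMult l = maxMult l' := by
  apply Nat.le_antisymm
  · exact maxMult_le_nat _ _ (fun k hk => by rw [h.count_eq]; exact count_le_maxMult _ _)
  · exact maxMult_le_nat _ _ (fun k hk => by rw [← h.count_eq]; exact count_le_maxMult _ _)

lemma foldl_max_le (t : List Int) (a B : Int) (ha : a ≤ B) (h : ∀ y ∈ t, y ≤ B) :
    t.foldl max a ≤ B := by
  induction t generalizing a with
  | nil => simpa using ha
  | cons x xs ih =>
    simp only [List.foldl_cons]
    exact ih _ (max_le ha (h x (List.mem_cons_self ..))) (fun y hy => h y (List.mem_cons_of_mem _ hy))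

-- A's max-over-keys loop over the distinct bigrams computes the maximal multiplicity
lemma maxfold_eq (bg : List (List Char)) :
    ((PySem.Set.ofList bg : List (List Char)).foldl
      (fun m k => if ((bg.count k : Int)) > m then ((bg.count k : Int)) else m) 0)
      = (maxMult bg : Int) := by
  have hstep : (fun (m : Int) (k : List Char) =>
      if ((bg.count k : Int)) > m then ((bg.count k : Int)) else m)
      = fun (m : Int) k => max m ((bg.count k : Int)) := by
    funext m k; simp [max_def]; split_ifs <;> omega
  rw [hstep, show (fun (m : Int) (k : List Char) => max m ((bg.count k : Int)))
      = fun m k => (fun (m : Int) (c : Int) => max m c) m ((fun k => (bg.count k : Int)) k) from rfl,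
    ← List.foldl_map]
  apply le_antisymm
  · apply foldl_max_le _ _ _ (by positivity)
    intro y hy
    obtain ⟨k, hk, rfl⟩ := List.mem_map.mp hy
    exact_mod_cast count_le_maxMult bg k
  · apply maxMult_le_int bg _ (PySem.List.le_foldl_max _ 0).1
    intro k hk
    exact (PySem.List.le_foldl_max _ 0).2 _
      (List.mem_map.mpr ⟨k, (PySem.List.mem_dedup bg k).mpr hk, rfl⟩)

-- B's run-length scan on a sorted list computes the maximal multiplicity
lemma scan_sorted (l : List (List Char)) (p : List Char) (r b : Int)
    (hs : List.Pairwise (· ≤ ·) l) (hp : ∀ y ∈ l, p ≤ y) (hr : 0 ≤ r) (hrb : r ≤ b) :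
    (l.foldl pvStepB (some p, r, b)).2.2
      = max b (max (r + (l.count p : Int)) (maxMult l : Int)) := by
  induction l generalizing p r b with
  | nil => simp [maxMult, max_def]; split_ifs <;> omega
  | cons x xs ih =>
    rw [List.pairwise_cons] at hs
    have hpx : p ≤ x := hp x (List.mem_cons_self ..)
    simp only [List.foldl_cons]
    by_cases hxp : x = p
    · subst hxp
      rw [show pvStepB (some x, r, b) x = (some x, r + 1, if r + 1 > b then r + 1 else b) from by
        simp [pvStepB]]
      rw [ih x (r + 1) _ hs.2 hs.1 (by omega) (by split_ifs <;> omega)]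
      simp only [maxMult, List.count_cons, beq_self_eq_true, if_true]
      push_cast
      simp only [max_def]
      split_ifs <;> omega
    · rw [show pvStepB (some p, r, b) x = (some x, 1, if 1 > b then 1 else b) from by
        simp [pvStepB, hxp]]
      rw [ih x 1 _ hs.2 hs.1 (by omega) (by split_ifs <;> omega)]
      have hnot : p ∉ x :: xs := by
        intro hmem
        rcases List.mem_cons.mp hmem with h | h
        · exact hxp h.symm
        · exact hxp (le_antisymm (hs.1 p h) hpx)
      have hc0 : (x :: xs).count p = 0 := List.count_eq_zero.mpr hnot
      rw [hc0]
      simp only [maxMult]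
      push_cast
      simp only [max_def]
      split_ifs <;> omega

lemma scan_top (l : List (List Char)) (hs : List.Pairwise (· ≤ ·) l) :
    (l.foldl pvStepB (none, 0, 0)).2.2 = (maxMult l : Int) := by
  cases l with
  | nil => simp [maxMult]
  | cons x xs =>
    rw [List.pairwise_cons] at hs
    simp only [List.foldl_cons]
    rw [show pvStepB (none, 0, 0) x = (some x, 1, 1) from by simp [pvStepB]]
    rw [scan_sorted xs x 1 1 hs.2 hs.1 (by omega) (le_refl 1)]
    simp only [maxMult]
    push_cast
    simp only [max_def]
    split_ifs <;> omega

-- the two Decidable-< instances on List Char are the same (sorted is elaborated with the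
-- default one, sorted_pairwise is stated with the LinearOrder one)
lemma sorted_inst_eq (l : List (List Char)) :
    PySem.List.sorted l (fun k => k) false
      = @PySem.List.sorted (List Char) (List Char) List.instLinearOrder.toLT
          LinearOrder.toDecidableLT l (fun k => k) false := by
  congr 1

-- A's dict-building loop builds exactly the counter of the bigram list
lemma dict_eq_counter (cs : List Char) :
    ((PySem.List.pyRange 0 (PySem.List.len cs - 1)).foldl
      (fun d i =>
        let join := [PySem.List.pyGetD cs i ' ', PySem.List.pyGetD cs (i + 1) ' ']
        if d.contains join then d.insert join (d.getD join 0 + 1) else d.insert join 1)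
      PySem.Dict.empty)
      = PySem.Dict.counter (pvBigrams cs) := by
  have hcol : (fun (d : PySem.Dict (List Char) Int) (i : Int) =>
      let join := [PySem.List.pyGetD cs i ' ', PySem.List.pyGetD cs (i + 1) ' ']
      if d.contains join then d.insert join (d.getD join 0 + 1) else d.insert join 1)
      = fun d i => d.insert [PySem.List.pyGetD cs i ' ', PySem.List.pyGetD cs (i + 1) ' ']
          (d.getD [PySem.List.pyGetD cs i ' ', PySem.List.pyGetD cs (i + 1) ' '] 0 + 1) := by
    funext d i
    by_cases h : d.contains [PySem.List.pyGetD cs i ' ', PySem.List.pyGetD cs (i + 1) ' '] = true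
    · simp [h]
    · rw [Bool.not_eq_true] at h
      simp [h, PySem.Dict.getD_of_not_contains d 0 h]
  rw [hcol]
  unfold pvBigrams
  rw [← PySem.Dict.foldl_insert_getD_add_one_eq_counter, List.foldl_map]

-- ===== VERDICT (by name: the statement is the Claim_ definition above) =====
theorem max_adj_chars_spec : Claim_equal_max_adj_chars := by
  intro word _
  show max_adj_chars word = max_adj_chars_alt word
  have hA : max_adj_chars word = (maxMult (pvBigrams word.toList) : Int) := by
    simp only [max_adj_chars]
    rw [dict_eq_counter]
    simp only [PySem.Dict.getD_counter, PySem.Dict.keys_counter]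
    exact maxfold_eq _
  have hsorted := PySem.List.sorted_pairwise (pvBigrams word.toList) (fun k => k)
  have hB : max_adj_chars_alt word = (maxMult (pvBigrams word.toList) : Int) := by
    unfold max_adj_chars_alt
    rw [show (id : List Char → List Char) = fun k => k from rfl, sorted_inst_eq]
    rw [scan_top _ hsorted]
    congr 1
    exact maxMult_perm _ _
      (@PySem.List.sorted_perm (List Char) (List Char) List.instLinearOrder.toLT
        LinearOrder.toDecidableLT (pvBigrams word.toList) (fun k => k) false)
  rw [hA, hB]
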